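-- pv_equiv track=rewrite | github.com/moonpiderman/Programmers | 2018_KAKAO_RECRUIT/That_Song/17683.py | solution
-- ===== SOURCE A (Python) =====
-- def solution(m, musicinfo):
--     scales = {
--         "C#": "H",
--         "D#": "I",
--         "F#": "J",
--         "G#": "K",
--         "A#": "L",
--     }
--     for _from, _to in scales.items():
--         m = m.replace(_from, _to)
--
--     max_played, answer = 0, "(None)"
--     for info in musicinfo:
--         start, end, title, scale = info.split(',')
--         for _from, _to in scales.items():
--             scale = scale.replace(_from, _to)
--         during_music = len(scale)
--
--         s_h, s_m = start.split(':')
--         e_h, e_m = end.split(':')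
--         play_time = (int(e_h) - int(s_h)) * 60 + int(e_m) - int(s_m)
--
--         real_play_time = scale * (play_time // during_music)
--
--         diff = play_time % during_music
--         real_play_time += scale[:diff]
--
--         if m in real_play_time and play_time > max_played:
--             max_played = play_time
--             answer = title
--     return answer
-- ===== SOURCE B (Python) =====
-- def solution(m, musicinfo):
--     NOTE = {'C': 'H', 'D': 'I', 'F': 'J', 'G': 'K', 'A': 'L'}
--
--     def canon(s):
--         # one-pass tokenizer: a note letter followed by '#' becomes one canonical char
--         out = []
--         i = 0
--         while i < len(s):
--             c = s[i]
--             if c in NOTE and i + 1 < len(s) and s[i + 1] == '#':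
--                 out.append(NOTE[c])
--                 i += 2
--             else:
--                 out.append(c)
--                 i += 1
--         return out
--
--     def minutes(t):
--         h, mm = t.split(':')
--         return int(h) * 60 + int(mm)
--
--     mel = canon(m)
--     k = len(mel)
--     best_time, best_title = 0, "(None)"
--     for info in musicinfo:
--         start, end, title, scale = info.split(',')
--         notes = canon(scale)
--         play = minutes(end) - minutes(start)
--         q, r = divmod(play, len(notes))
--         played = notes * q + notes[:r]
--         n = len(played)
--         found = any(played[i:i + k] == mel for i in range(n - k + 1))
--         if found and play > best_time:
--             best_time, best_title = play, title
--     return best_title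
-- ===== Notes on version B (the rewrite author's own statement) =====
-- stated objective: alternative
-- what changed: Replaces the five sequential string-replace passes by a single-pass tokenizer producing a canonical note list, and the substring 'in' test by an explicit sliding-window sublist comparison over that list; minutes are computed by a helper instead of inline hour/minute arithmetic.
import Mathlib
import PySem

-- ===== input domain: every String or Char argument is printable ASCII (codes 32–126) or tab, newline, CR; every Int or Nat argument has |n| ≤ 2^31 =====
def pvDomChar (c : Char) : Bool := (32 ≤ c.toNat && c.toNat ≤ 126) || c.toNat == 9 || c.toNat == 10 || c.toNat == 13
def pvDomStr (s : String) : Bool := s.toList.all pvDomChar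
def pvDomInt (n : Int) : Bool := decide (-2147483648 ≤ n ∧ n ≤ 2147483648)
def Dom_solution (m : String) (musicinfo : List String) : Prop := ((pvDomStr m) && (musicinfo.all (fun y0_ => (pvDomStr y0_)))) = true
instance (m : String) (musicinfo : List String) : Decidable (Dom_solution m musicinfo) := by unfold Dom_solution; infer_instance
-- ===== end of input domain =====

-- B replaces A's five sequential string-replace passes by a one-pass tokenizer and the
-- substring 'in' test by an explicit sliding-window sublist comparison (alternative, same cost).


-- ===== PORT A =====
-- the five sequential replaces, in A's dict order C#,D#,F#,G#,A#
def aSubst (s : List Char) : List Char :=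
  PySem.Chars.replace (PySem.Chars.replace (PySem.Chars.replace (PySem.Chars.replace
    (PySem.Chars.replace s ['C','#'] ['H']) ['D','#'] ['I']) ['F','#'] ['J']) ['G','#'] ['K']) ['A','#'] ['L']

-- Python sequence repetition `s * n` (n ≤ 0 gives empty); exact, used by both ports
def seqMul (s : List Char) (n : Int) : List Char := (List.replicate n.toNat s).flatten

def aStep (mm : List Char) (st : Int × String) (info : String) : Int × String :=
  match PySem.Str.split? info "," with
  | some [start, endt, title, scale] =>
    let sc := aSubst scale.toList
    let during : Int := sc.length
    (match PySem.Str.split? start ":", PySem.Str.split? endt ":" with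
     | some [sh, sm], some [eh, em] =>
       (match PySem.Int.ofStr? sh, PySem.Int.ofStr? sm, PySem.Int.ofStr? eh, PySem.Int.ofStr? em with
        | some shv, some smv, some ehv, some emv =>
          if during == 0 then st   -- Python raises ZeroDivisionError here; excluded by Pre_
          else
            let play := (ehv - shv) * 60 + emv - smv
            let real := seqMul sc (PySem.Int.floordiv play during)
            let diff := PySem.Int.mod play during
            let real2 := real ++ PySem.List.slice sc none (some diff)
            if PySem.Chars.isIn mm real2 && decide (play > st.1) then (play, title) else st
        | _, _, _, _ => st)       -- Python raises ValueError here; excluded by Pre_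
     | _, _ => st)                -- Python raises ValueError (unpacking); excluded by Pre_
  | _ => st                       -- Python raises ValueError (unpacking); excluded by Pre_

def solution (m : String) (musicinfo : List String) : String :=
  (musicinfo.foldl (aStep (aSubst m.toList)) (0, "(None)")).2

-- ===== PORT B =====
def bTable : List (Char × Char) := [('C','H'),('D','I'),('F','J'),('G','K'),('A','L')]

-- B's one-pass tokenizer: a note letter followed by '#' becomes one canonical char
def canon : List Char → List Char
  | [] => []
  | c :: t =>
    if (bTable.lookup c).isSome ∧ t.head? = some '#'
    then ((bTable.lookup c).getD c) :: canon t.tail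
    else c :: canon t
termination_by l => l.length
decreasing_by
  · simp only [List.length_cons, List.length_tail]; omega
  · simp

def bMinutes? (t : String) : Option Int :=
  match PySem.Str.split? t ":" with
  | some [h, mm] =>
    (match PySem.Int.ofStr? h, PySem.Int.ofStr? mm with
     | some hv, some mv => some (hv * 60 + mv)
     | _, _ => none)
  | _ => none

def bStep (mel : List Char) (k : Int) (st : Int × String) (info : String) : Int × String :=
  match PySem.Str.split? info "," with
  | some [start, endt, title, scale] =>
    let notes := canon scale.toList
    (match bMinutes? endt, bMinutes? start with
     | some me, some ms =>
       (match PySem.Int.divmod? (me - ms) (notes.length : Int) with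
        | some (q, r) =>
          let play := me - ms
          let played := seqMul notes q ++ PySem.List.slice notes none (some r)
          let n : Int := played.length
          let found := (PySem.List.pyRange 0 (n - k + 1) 1).any
            (fun i => PySem.List.slice played (some i) (some (i + k)) == mel)
          if found && decide (play > st.1) then (play, title) else st
        | none => st)   -- ZeroDivisionError; excluded by Pre_
     | _, _ => st)      -- ValueError; excluded by Pre_
  | _ => st             -- unpacking ValueError; excluded by Pre_

def solution_alt (m : String) (musicinfo : List String) : String :=
  let mel := canon m.toList
  let k : Int := mel.length
  (musicinfo.foldl (bStep mel k) (0, "(None)")).2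

-- ===== PRECONDITION & SPEC =====
-- Pre_ excludes exactly the inputs on which the Python A raises: an entry whose comma-split is not
-- 4 fields, a time whose colon-split is not 2 int()-parsable fields, or an empty scale (ZeroDivisionError).
def preTime (t : String) : Bool :=
  match PySem.Str.split? t ":" with
  | some [h, mm] => (PySem.Int.ofStr? h).isSome && (PySem.Int.ofStr? mm).isSome
  | _ => false

def preInfo (info : String) : Bool :=
  match PySem.Str.split? info "," with
  | some [start, endt, _title, scale] => !scale.toList.isEmpty && preTime start && preTime endt
  | _ => false

def Pre_solution (m : String) (musicinfo : List String) : Prop :=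
  ∀ info ∈ musicinfo, preInfo info = true

instance (m : String) (musicinfo : List String) : Decidable (Pre_solution m musicinfo) := by
  unfold Pre_solution; infer_instance

def pvWitness_solution : String × List String := ("ABC", ["10:00,10:03,WORLD,ABC", "12:00,12:14,HELLO,CDEFGAB"])

def Spec_solution (m : String) (musicinfo : List String) (out : String) : Prop := out = solution_alt m musicinfo
instance (m : String) (musicinfo : List String) (out : String) : Decidable (Spec_solution m musicinfo out) := by unfold Spec_solution; infer_instance

-- ===== CLAIM (what is proved, stated in full; the proofs are below) =====
def Claim_equal_solution : Prop := ∀ (m : String) (musicinfo : List String), Dom_solution m musicinfo → Pre_solution m musicinfo → Spec_solution m musicinfo (solution m musicinfo)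

-- ===== LEMMAS AND PROOFS =====

-- structural form of one two-character replace pass
def repl1 (a b : Char) : List Char → List Char
  | [] => []
  | c :: t => if c = a ∧ t.head? = some '#' then b :: repl1 a b t.tail else c :: repl1 a b t
termination_by l => l.length
decreasing_by
  · simp only [List.length_cons, List.length_tail]; omega
  · simp

theorem repl1_nil (a b : Char) : repl1 a b [] = [] := by simp [repl1]

theorem repl1_cons (a b c : Char) (t : List Char) :
    repl1 a b (c :: t) = if c = a ∧ t.head? = some '#' then b :: repl1 a b t.tail
                         else c :: repl1 a b t := by
  rw [repl1]

theorem repl1_hit (a b : Char) (ha : a ≠ '#') (t : List Char) :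
    repl1 a b (a :: '#' :: t) = b :: repl1 a b t := by
  simp [repl1_cons]

theorem repl1_cons_ne (a b c : Char) (h : c ≠ a) (t : List Char) :
    repl1 a b (c :: t) = c :: repl1 a b t := by
  simp [repl1_cons, h]

theorem repl1_hash (a b : Char) (h : a ≠ '#') (t : List Char) :
    repl1 a b ('#' :: t) = '#' :: repl1 a b t := by
  exact repl1_cons_ne a b '#' (Ne.symm h) t

theorem repl1_cons_nohash (a b c : Char) (t : List Char) (h : t.head? ≠ some '#') :
    repl1 a b (c :: t) = c :: repl1 a b t := by
  rw [repl1_cons, if_neg]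
  rintro ⟨-, h2⟩; exact h h2

theorem head?_repl1 (a b : Char) (hb : b ≠ '#') (t : List Char) (h : t.head? ≠ some '#') :
    (repl1 a b t).head? ≠ some '#' := by
  cases t with
  | nil => simp [repl1_nil]
  | cons c u =>
    rw [repl1_cons]
    split
    · simpa using hb
    · simpa using fun h2 => h (by simp [h2])

theorem go_eq_repl1 (a b : Char) (fuel : Nat) (l acc : List Char) (h : l.length ≤ fuel) :
    PySem.Chars.replace.go [a,'#'] [b] fuel l acc = acc.reverse ++ repl1 a b l := by
  induction fuel generalizing l acc with
  | zero =>
    have : l = [] := by cases l <;> simp_all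
    subst this
    rw [PySem.Chars.replace.go.eq_def]; simp [repl1_nil]
  | succ fuel ih =>
    cases l with
    | nil => rw [PySem.Chars.replace.go.eq_def]; simp [repl1_nil]
    | cons c t =>
      rw [PySem.Chars.replace.go.eq_def]
      simp only []
      by_cases hp : [a,'#'].isPrefixOf (c :: t) = true
      · rw [if_pos hp]
        have hpre : [a,'#'] <+: c :: t := List.isPrefixOf_iff_prefix.mp hp
        obtain ⟨rest, hrest⟩ := hpre
        have hc : c = a := by simpa using congrArg List.head? hrest.symm
        have ht : t = '#' :: rest := by simpa using congrArg List.tail hrest.symm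
        subst ht
        rw [show List.drop ([a,'#'] : List Char).length (c :: '#' :: rest) = rest by simp]
        rw [ih rest ([b].reverse ++ acc) (by simp at h ⊢; omega)]
        rw [repl1_cons, if_pos ⟨hc, by simp⟩]
        simp
      · rw [if_neg hp]
        rw [ih t (c :: acc) (by simp at h ⊢; omega)]
        rw [repl1_cons, if_neg]
        · simp
        · rintro ⟨rfl, h2⟩
          cases t with
          | nil => simp at h2
          | cons d u =>
            simp at h2; subst h2
            exact hp (by simp [List.isPrefixOf_iff_prefix])

theorem replace_eq_repl1 (a b : Char) (s : List Char) :
    PySem.Chars.replace s [a,'#'] [b] = repl1 a b s := by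
  rw [PySem.Chars.replace]
  simp only [List.isEmpty_cons, if_false]
  simpa using go_eq_repl1 a b s.length s [] le_rfl

-- canon unfoldings
theorem canon_nil : canon [] = [] := by simp [canon]

theorem canon_cons (c : Char) (t : List Char) :
    canon (c :: t) = if (bTable.lookup c).isSome ∧ t.head? = some '#'
                     then ((bTable.lookup c).getD c) :: canon t.tail
                     else c :: canon t := by
  rw [canon]

-- the five sequential replaces, as repl1
def repl5 (s : List Char) : List Char :=
  repl1 'A' 'L' (repl1 'G' 'K' (repl1 'F' 'J' (repl1 'D' 'I' (repl1 'C' 'H' s))))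

theorem repl5_cons_notletter (c : Char) (t : List Char)
    (h : bTable.lookup c = none) : repl5 (c :: t) = c :: repl5 t := by
  have h1 : c ≠ 'C' := by rintro rfl; simp [bTable] at h
  have h2 : c ≠ 'D' := by rintro rfl; simp [bTable] at h
  have h3 : c ≠ 'F' := by rintro rfl; simp [bTable] at h
  have h4 : c ≠ 'G' := by rintro rfl; simp [bTable] at h
  have h5 : c ≠ 'A' := by rintro rfl; simp [bTable] at h
  simp [repl5, repl1_cons_ne _ _ _ h1, repl1_cons_ne _ _ _ h2, repl1_cons_ne _ _ _ h3,
        repl1_cons_ne _ _ _ h4, repl1_cons_ne _ _ _ h5]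

theorem repl5_cons_nohash (c : Char) (t : List Char) (h : t.head? ≠ some '#') :
    repl5 (c :: t) = c :: repl5 t := by
  have hC := head?_repl1 'C' 'H' (by decide) t h
  have hD := head?_repl1 'D' 'I' (by decide) _ hC
  have hF := head?_repl1 'F' 'J' (by decide) _ hD
  have hG := head?_repl1 'G' 'K' (by decide) _ hF
  simp [repl5, repl1_cons_nohash _ _ _ _ h, repl1_cons_nohash _ _ _ _ hC,
        repl1_cons_nohash _ _ _ _ hD, repl1_cons_nohash _ _ _ _ hF,
        repl1_cons_nohash _ _ _ _ hG]

theorem repl5_eq_canon (s : List Char) : repl5 s = canon s := by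
  induction s using canon.induct with
  | case1 => simp [repl5, repl1_nil, canon_nil]
  | case2 c t hcond ih =>
    obtain ⟨hsome, hhash⟩ := hcond
    obtain ⟨t', rfl⟩ : ∃ t', t = '#' :: t' := by
      cases t with
      | nil => simp at hhash
      | cons d u => simp at hhash; subst hhash; exact ⟨u, rfl⟩
    rw [canon_cons, if_pos ⟨hsome, by simp⟩]
    simp only [List.tail_cons] at ih ⊢
    rw [← ih]
    have hC : c = 'C' ∨ c = 'D' ∨ c = 'F' ∨ c = 'G' ∨ c = 'A' := by
      by_contra hno
      push_neg at hno
      obtain ⟨n1, n2, n3, n4, n5⟩ := hno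
      have e1 : (c == 'C') = false := by simp [n1]
      have e2 : (c == 'D') = false := by simp [n2]
      have e3 : (c == 'F') = false := by simp [n3]
      have e4 : (c == 'G') = false := by simp [n4]
      have e5 : (c == 'A') = false := by simp [n5]
      simp [bTable, List.lookup, e1, e2, e3, e4, e5] at hsome
    rcases hC with rfl | rfl | rfl | rfl | rfl
    · rw [show ((bTable.lookup 'C').getD 'C') = 'H' from by decide]
      simp [repl5, bTable, repl1_hit 'C' 'H' (by decide),
            repl1_cons_ne 'D' 'I' 'H' (by decide), repl1_cons_ne 'F' 'J' 'H' (by decide),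
            repl1_cons_ne 'G' 'K' 'H' (by decide), repl1_cons_ne 'A' 'L' 'H' (by decide)]
    · rw [show ((bTable.lookup 'D').getD 'D') = 'I' from by decide]
      simp [repl5, bTable, repl1_cons_ne 'C' 'H' 'D' (by decide), repl1_hash 'C' 'H' (by decide),
            repl1_hit 'D' 'I' (by decide),
            repl1_cons_ne 'F' 'J' 'I' (by decide), repl1_cons_ne 'G' 'K' 'I' (by decide),
            repl1_cons_ne 'A' 'L' 'I' (by decide)]
    · rw [show ((bTable.lookup 'F').getD 'F') = 'J' from by decide]
      simp [repl5, bTable, repl1_cons_ne 'C' 'H' 'F' (by decide), repl1_hash 'C' 'H' (by decide),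
            repl1_cons_ne 'D' 'I' 'F' (by decide), repl1_hash 'D' 'I' (by decide),
            repl1_hit 'F' 'J' (by decide),
            repl1_cons_ne 'G' 'K' 'J' (by decide), repl1_cons_ne 'A' 'L' 'J' (by decide)]
    · rw [show ((bTable.lookup 'G').getD 'G') = 'K' from by decide]
      simp [repl5, bTable, repl1_cons_ne 'C' 'H' 'G' (by decide), repl1_hash 'C' 'H' (by decide),
            repl1_cons_ne 'D' 'I' 'G' (by decide), repl1_hash 'D' 'I' (by decide),
            repl1_cons_ne 'F' 'J' 'G' (by decide), repl1_hash 'F' 'J' (by decide),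
            repl1_hit 'G' 'K' (by decide), repl1_cons_ne 'A' 'L' 'K' (by decide)]
    · rw [show ((bTable.lookup 'A').getD 'A') = 'L' from by decide]
      simp [repl5, bTable, repl1_cons_ne 'C' 'H' 'A' (by decide), repl1_hash 'C' 'H' (by decide),
            repl1_cons_ne 'D' 'I' 'A' (by decide), repl1_hash 'D' 'I' (by decide),
            repl1_cons_ne 'F' 'J' 'A' (by decide), repl1_hash 'F' 'J' (by decide),
            repl1_cons_ne 'G' 'K' 'A' (by decide), repl1_hash 'G' 'K' (by decide),
            repl1_hit 'A' 'L' (by decide)]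
  | case3 c t hcond ih =>
    rw [canon_cons, if_neg hcond, ← ih]
    by_cases hh : t.head? = some '#'
    · have hnone : bTable.lookup c = none := by
        rcases h : bTable.lookup c with _ | d
        · rfl
        · exact absurd ⟨by simp [h], hh⟩ hcond
      exact repl5_cons_notletter c t hnone
    · exact repl5_cons_nohash c t hh

theorem aSubst_eq_canon (s : List Char) : aSubst s = canon s := by
  rw [← repl5_eq_canon]
  simp [aSubst, repl5, replace_eq_repl1]

-- the sliding-window test equals Python's substring test
theorem any_window_eq_isIn (mel s : List Char) :
    ((PySem.List.pyRange 0 ((s.length : Int) - (mel.length : Int) + 1) 1).any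
       (fun i => PySem.List.slice s (some i) (some (i + (mel.length : Int))) == mel))
    = PySem.Chars.isIn mel s := by
  rcases hin : PySem.Chars.isIn mel s with _ | _
  · -- isIn = false: no window matches
    rw [List.any_eq_false]
    intro i hi
    rw [PySem.List.mem_pyRange_one] at hi
    obtain ⟨j, rfl⟩ : ∃ j : Nat, i = (j : Int) := ⟨i.toNat, (Int.toNat_of_nonneg hi.1).symm⟩
    intro hcontr
    have hslice : PySem.List.slice s (some (j : Int)) (some ((j : Int) + (mel.length : Int))) = mel := by
      simpa using hcontr
    have hpre : mel <+: s.drop j := by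
      rw [List.prefix_iff_eq_take]
      rw [show (j : Int) + (mel.length : Int) = ((j + mel.length : Nat) : Int) by push_cast; ring,
          PySem.List.slice_natCast] at hslice
      simp only [Nat.add_sub_cancel_left] at hslice
      exact hslice.symm
    have := (PySem.Chars.exists_prefix_drop_iff_isIn mel s).mp ⟨j, hpre⟩
    rw [hin] at this; exact absurd this (by simp)
  · -- isIn = true: some window matches
    obtain ⟨j, hpre⟩ := (PySem.Chars.exists_prefix_drop_iff_isIn mel s).mpr hin
    rw [List.any_eq_true]
    have hlen : mel.length ≤ s.length - j := by
      simpa using hpre.length_le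
    rcases Nat.eq_zero_or_pos mel.length with hk | hk
    · obtain rfl : mel = [] := List.eq_nil_of_length_eq_zero hk
      refine ⟨0, ?_, ?_⟩
      · rw [PySem.List.mem_pyRange_one]; constructor <;> simp
      · rw [show (0 : Int) + ((List.length ([] : List Char) : Int)) = ((0 : Nat) : Int) by simp,
            show (0 : Int) = ((0 : Nat) : Int) by simp, PySem.List.slice_natCast]
        simp
    · have hmel : mel ≠ [] := by rintro rfl; simp at hk
      have hj : j + mel.length ≤ s.length := by
        by_cases hjs : j ≤ s.length
        · omega
        · exfalso
          have : s.drop j = [] := List.drop_eq_nil_of_le (by omega)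
          rw [this, List.prefix_nil] at hpre
          exact hmel hpre
      refine ⟨(j : Int), ?_, ?_⟩
      · rw [PySem.List.mem_pyRange_one]
        constructor
        · exact Int.natCast_nonneg j
        · omega
      · rw [show (j : Int) + (mel.length : Int) = ((j + mel.length : Nat) : Int) by push_cast; ring,
            PySem.List.slice_natCast]
        simp only [Nat.add_sub_cancel_left, beq_iff_eq]
        exact ((List.prefix_iff_eq_take.mp hpre).symm)

theorem step_eq (m : String) (st : Int × String) (info : String) :
    aStep (aSubst m.toList) st info = bStep (canon m.toList) ((canon m.toList).length : Int) st info := by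
  rw [aStep, bStep]
  rcases hs : PySem.Str.split? info "," with _ | fields
  · rfl
  rcases fields with _ | ⟨start, fields⟩; · rfl
  rcases fields with _ | ⟨endt, fields⟩; · rfl
  rcases fields with _ | ⟨title, fields⟩; · rfl
  rcases fields with _ | ⟨scale, fields⟩; · rfl
  rcases fields with _ | ⟨x, fields⟩
  swap; · rfl
  rcases hst : PySem.Str.split? start ":" with _ | (_ | ⟨sh, (_ | ⟨sm, (_ | ⟨y, sp⟩)⟩)⟩)
  · rcases het : PySem.Str.split? endt ":" with _ | (_ | ⟨eh, (_ | ⟨em, (_ | ⟨z, ep⟩)⟩)⟩)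
    · simp [bMinutes?, hst, het]
    · simp [bMinutes?, hst, het]
    · simp [bMinutes?, hst, het]
    · rcases heh : PySem.Int.ofStr? eh with _ | ehv <;>
        rcases hem : PySem.Int.ofStr? em with _ | emv <;>
        simp [bMinutes?, hst, het, heh, hem]
    · simp [bMinutes?, hst, het]
  · rcases het : PySem.Str.split? endt ":" with _ | (_ | ⟨eh, (_ | ⟨em, (_ | ⟨z, ep⟩)⟩)⟩)
    · simp [bMinutes?, hst, het]
    · simp [bMinutes?, hst, het]
    · simp [bMinutes?, hst, het]
    · rcases heh : PySem.Int.ofStr? eh with _ | ehv <;>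
        rcases hem : PySem.Int.ofStr? em with _ | emv <;>
        simp [bMinutes?, hst, het, heh, hem]
    · simp [bMinutes?, hst, het]
  · rcases het : PySem.Str.split? endt ":" with _ | (_ | ⟨eh, (_ | ⟨em, (_ | ⟨z, ep⟩)⟩)⟩)
    · simp [bMinutes?, hst, het]
    · simp [bMinutes?, hst, het]
    · simp [bMinutes?, hst, het]
    · rcases heh : PySem.Int.ofStr? eh with _ | ehv <;>
        rcases hem : PySem.Int.ofStr? em with _ | emv <;>
        simp [bMinutes?, hst, het, heh, hem]
    · simp [bMinutes?, hst, het]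
  · rcases hsh : PySem.Int.ofStr? sh with _ | shv
    · rcases het : PySem.Str.split? endt ":" with _ | (_ | ⟨eh, (_ | ⟨em, (_ | ⟨z, ep⟩)⟩)⟩)
      · simp [bMinutes?, hst, het, hsh]
      · simp [bMinutes?, hst, het, hsh]
      · simp [bMinutes?, hst, het, hsh]
      · rcases heh : PySem.Int.ofStr? eh with _ | ehv <;>
          rcases hem : PySem.Int.ofStr? em with _ | emv <;>
          simp [bMinutes?, hst, het, hsh, heh, hem]
      · simp [bMinutes?, hst, het, hsh]
    rcases hsm : PySem.Int.ofStr? sm with _ | smv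
    · rcases het : PySem.Str.split? endt ":" with _ | (_ | ⟨eh, (_ | ⟨em, (_ | ⟨z, ep⟩)⟩)⟩)
      · simp [bMinutes?, hst, het, hsh, hsm]
      · simp [bMinutes?, hst, het, hsh, hsm]
      · simp [bMinutes?, hst, het, hsh, hsm]
      · rcases heh : PySem.Int.ofStr? eh with _ | ehv <;>
          rcases hem : PySem.Int.ofStr? em with _ | emv <;>
          simp [bMinutes?, hst, het, hsh, hsm, heh, hem]
      · simp [bMinutes?, hst, het, hsh, hsm]
    rcases het : PySem.Str.split? endt ":" with _ | (_ | ⟨eh, (_ | ⟨em, (_ | ⟨z, ep⟩)⟩)⟩)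
    · simp [bMinutes?, hst, het, hsh, hsm]
    · simp [bMinutes?, hst, het, hsh, hsm]
    · simp [bMinutes?, hst, het, hsh, hsm]
    · rcases heh : PySem.Int.ofStr? eh with _ | ehv
      · simp [bMinutes?, hst, het, hsh, hsm, heh]
      rcases hem : PySem.Int.ofStr? em with _ | emv
      · simp [bMinutes?, hst, het, hsh, hsm, heh, hem]
      -- main path: both times well-formed
      simp only [bMinutes?, hst, het, hsh, hsm, heh, hem, aSubst_eq_canon,
                 PySem.Int.divmod?, PySem.Int.floordiv, PySem.Int.mod, beq_iff_eq]
      by_cases hz : ((canon scale.toList).length : Int) = 0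
      · rw [if_pos hz, if_pos hz]
      · rw [if_neg hz, if_neg hz]
        have hplay : (ehv - shv) * 60 + emv - smv = ehv * 60 + emv - (shv * 60 + smv) := by ring
        rw [hplay, ← any_window_eq_isIn]
    · simp [bMinutes?, hst, het, hsh, hsm]
  · rcases het : PySem.Str.split? endt ":" with _ | (_ | ⟨eh, (_ | ⟨em, (_ | ⟨z, ep⟩)⟩)⟩)
    · simp [bMinutes?, hst, het]
    · simp [bMinutes?, hst, het]
    · simp [bMinutes?, hst, het]
    · rcases heh : PySem.Int.ofStr? eh with _ | ehv <;>
        rcases hem : PySem.Int.ofStr? em with _ | emv <;>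
        simp [bMinutes?, hst, het, heh, hem]
    · simp [bMinutes?, hst, het]

-- ===== VERDICT (by name: the statement is the Claim_ definition above) =====
theorem foldl_eq (m : String) (l : List String) (st : Int × String) :
    l.foldl (aStep (aSubst m.toList)) st
      = l.foldl (bStep (canon m.toList) ((canon m.toList).length : Int)) st := by
  induction l generalizing st with
  | nil => rfl
  | cons i t ih => simp only [List.foldl_cons, step_eq, ih]

theorem solution_spec : Claim_equal_solution := by
  intro m musicinfo _ _
  unfold Spec_solution solution solution_alt
  rw [foldl_eq]
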